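-- pv_equiv track=rewrite | github.com/radforaw/Bus-Journey-Time | rjt.py | simplerldecoder
-- ===== SOURCE A (Python) =====
-- def simplerldecoder(data):
-- 	flag=False
-- 	result={}
-- 	positioncounter=0
-- 	currentstart=0
--
-- 	for x in data:
-- 		if x:
-- 			if not flag:
-- 				flag=True
-- 				result[positioncounter]=1
-- 				currentstart=positioncounter
-- 			else:
-- 				result[currentstart]+=1
-- 		if not x and flag:
-- 			flag=False
-- 		positioncounter+=1
-- 	return result
-- ===== SOURCE B (Python) =====
-- def simplerldecoder(data):
--     result = {}
--     i = 0
--     n = len(data)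
--     while i < n:
--         if data[i]:
--             j = i + 1
--             while j < n and data[j]:
--                 j += 1
--             result[i] = j - i
--             i = j
--         else:
--             i += 1
--     return result
-- ===== Notes on version B (the rewrite author's own statement) =====
-- stated objective: alternative
-- what changed: Replaced A's flag/currentstart state machine (one mutable dict entry incremented per element) with an index-based run scanner: find each maximal run of truthy values with an inner scan, record its start and full length at once, and jump past the run.
import Mathlib
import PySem

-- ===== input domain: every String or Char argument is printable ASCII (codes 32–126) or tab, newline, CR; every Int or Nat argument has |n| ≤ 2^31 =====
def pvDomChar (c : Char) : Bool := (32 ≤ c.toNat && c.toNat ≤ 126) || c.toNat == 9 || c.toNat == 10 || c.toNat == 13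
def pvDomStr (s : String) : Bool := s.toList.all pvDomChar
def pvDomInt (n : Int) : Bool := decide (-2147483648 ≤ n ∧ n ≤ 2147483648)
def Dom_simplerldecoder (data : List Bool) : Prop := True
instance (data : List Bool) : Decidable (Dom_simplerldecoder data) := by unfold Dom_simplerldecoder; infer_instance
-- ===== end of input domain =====

-- B replaces A's flag/currentstart state machine with a run-scanning loop (record each maximal
-- truthy run's start and length at once, then jump past it); same O(n) cost, alternative structure.

-- ===== PORT A =====
-- loop body of A: handles one element x, state (flag, result, positioncounter, currentstart);
-- the two 'if's of A are merged into one branch tree producing the same values in the same order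
-- (when x is falsy the flag always ends False exactly when it was False or the second 'if' fired).
def pvStepA (s : Bool × PySem.Dict Int Int × Int × Int) (x : Bool) :
    Bool × PySem.Dict Int Int × Int × Int :=
  let flag := s.1
  let result := s.2.1
  let pc := s.2.2.1
  let cs := s.2.2.2
  if x then
    if !flag then (true, result.insert pc 1, pc + 1, pc)
    else (true, result.insert cs (result.getD cs 0 + 1), pc + 1, cs)
  else (false, result, pc + 1, cs)

def simplerldecoder (data : List Bool) : List (Int × Int) :=
  ((data.foldl pvStepA (false, PySem.Dict.empty, 0, 0)).2.1).items

-- ===== PORT B =====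
-- inner while of B: length of the leading run of true values
def pvRunLen : List Bool → Nat
  | true :: rest => pvRunLen rest + 1
  | _ => 0

-- outer while of B: scan from position pos, recording (start, length) of each truthy run
def pvScan : List Bool → Int → List (Int × Int)
  | [], _ => []
  | false :: rest, pos => pvScan rest (pos + 1)
  | true :: rest, pos =>
      let k := pvRunLen rest + 1
      (pos, (k : Int)) :: pvScan (rest.drop (pvRunLen rest)) (pos + (k : Int))
termination_by data _ => data.length
decreasing_by
  all_goals (simp [List.length_drop]; try omega)

def simplerldecoder_alt (data : List Bool) : List (Int × Int) := pvScan data 0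

-- ===== PRECONDITION & SPEC =====
def Spec_simplerldecoder (data : List Bool) (out : List (Int × Int)) : Prop := out = simplerldecoder_alt data
instance (data : List Bool) (out : List (Int × Int)) : Decidable (Spec_simplerldecoder data out) := by unfold Spec_simplerldecoder; infer_instance

-- ===== CLAIM (what is proved, stated in full; the proofs are below) =====
def Claim_equal_simplerldecoder : Prop := ∀ (data : List Bool), Dom_simplerldecoder data → Spec_simplerldecoder data (simplerldecoder data)

-- ===== LEMMAS AND PROOFS =====

-- Invariant for A's fold, both flag states at once:
-- flag = false: the finished dict is the accumulated items followed by B's scan of the rest;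
-- flag = true : the open run's entry (cs, v) is last, keys are increasing and below pc.
theorem pvFoldA_spec (data : List Bool) :
    (∀ (l : List (Int × Int)) (p cs : Int),
        (l.map Prod.fst).Pairwise (· < ·) → (∀ k ∈ l.map Prod.fst, k < p) →
        ((data.foldl pvStepA (false, PySem.Dict.mk l, p, cs)).2.1).items = l ++ pvScan data p)
  ∧ (∀ (l : List (Int × Int)) (cs v p : Int),
        ((l ++ [(cs, v)]).map Prod.fst).Pairwise (· < ·) →
        (∀ k ∈ (l ++ [(cs, v)]).map Prod.fst, k < p) →
        ((data.foldl pvStepA (true, PySem.Dict.mk (l ++ [(cs, v)]), p, cs)).2.1).items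
          = l ++ [(cs, v + (pvRunLen data : Int))]
              ++ pvScan (data.drop (pvRunLen data)) (p + (pvRunLen data : Int))) := by
  induction data with
  | nil =>
      constructor
      · intro l p cs _ _
        simp [pvScan]
      · intro l cs v p _ _
        simp [pvScan, pvRunLen]
  | cons x rest ih =>
      obtain ⟨ihF, ihT⟩ := ih
      constructor
      · -- flag = false
        intro l p cs hpair hlt
        cases x with
        | false =>
            have hstep : pvStepA (false, PySem.Dict.mk l, p, cs) false
                = (false, PySem.Dict.mk l, p + 1, cs) := by simp [pvStepA]
            rw [List.foldl_cons, hstep,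
              ihF l (p + 1) cs hpair (fun k hk => by have := hlt k hk; omega)]
            simp [pvScan]
        | true =>
            have hnc : (PySem.Dict.mk l).contains p = false := by
              rw [PySem.Dict.contains_eq_decide_mem_keys]
              simp only [decide_eq_false_iff_not]
              intro hmem
              have : p < p := hlt p (by simpa [PySem.Dict.keys] using hmem)
              omega
            have hins : (PySem.Dict.mk l).insert p 1 = PySem.Dict.mk (l ++ [(p, 1)]) := by
              apply PySem.Dict.ext
              rw [PySem.Dict.items_insert_of_not_contains _ _ hnc]
            have hstep : pvStepA (false, PySem.Dict.mk l, p, cs) true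
                = (true, PySem.Dict.mk (l ++ [(p, 1)]), p + 1, p) := by
              simp [pvStepA, hins]
            have hpair' : ((l ++ [(p, (1 : Int))]).map Prod.fst).Pairwise (· < ·) := by
              simp only [List.map_append, List.map_cons, List.map_nil, List.pairwise_append]
              exact ⟨hpair, by simp, by intro a ha b hb; simp at hb; subst hb; exact hlt a ha⟩
            have hlt' : ∀ k ∈ (l ++ [(p, (1 : Int))]).map Prod.fst, k < p + 1 := by
              intro k hk
              simp only [List.map_append, List.map_cons, List.map_nil, List.mem_append,
                List.mem_singleton] at hk
              rcases hk with hk | hk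
              · have := hlt k hk; omega
              · omega
            rw [List.foldl_cons, hstep, ihT l p 1 (p + 1) hpair' hlt']
            have e1 : (1 : Int) + (pvRunLen rest : Int)
                = ((pvRunLen rest + 1 : Nat) : Int) := by push_cast; ring
            have e2 : p + 1 + (pvRunLen rest : Int)
                = p + ((pvRunLen rest + 1 : Nat) : Int) := by push_cast; ring
            rw [e1, e2]
            simp [pvScan]
      · -- flag = true
        intro l cs v p hpair hlt
        have hcs_lt : ∀ k ∈ l.map Prod.fst, k < cs := by
          intro k hk
          simp only [List.map_append, List.map_cons, List.map_nil,
            List.pairwise_append] at hpair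
          exact hpair.2.2 k hk cs (by simp)
        cases x with
        | false =>
            have hstep : pvStepA (true, PySem.Dict.mk (l ++ [(cs, v)]), p, cs) false
                = (false, PySem.Dict.mk (l ++ [(cs, v)]), p + 1, cs) := by simp [pvStepA]
            rw [List.foldl_cons, hstep,
              ihF (l ++ [(cs, v)]) (p + 1) cs hpair (fun k hk => by have := hlt k hk; omega)]
            rw [show pvRunLen (false :: rest) = 0 from rfl]
            simp [pvScan]
        | true =>
            have hnodup : ((l ++ [(cs, v)]).map Prod.fst).Nodup :=
              hpair.imp (fun h => ne_of_lt h)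
            have hget : (PySem.Dict.mk (l ++ [(cs, v)])).getD cs 0 = v := by
              apply PySem.Dict.getD_of_mem_items
              · simp
              · simpa [PySem.Dict.keys] using hnodup
            have hc : (PySem.Dict.mk (l ++ [(cs, v)])).contains cs = true := by
              rw [PySem.Dict.contains_eq_decide_mem_keys]
              simp [PySem.Dict.keys]
            have hins : (PySem.Dict.mk (l ++ [(cs, v)])).insert cs (v + 1)
                = PySem.Dict.mk (l ++ [(cs, v + 1)]) := by
              apply PySem.Dict.ext
              rw [PySem.Dict.items_insert_of_contains _ _ hc]
              show List.map _ (l ++ [(cs, v)]) = l ++ [(cs, v + 1)]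
              rw [List.map_append]
              congr 1
              · apply List.map_congr_left _ |>.trans (List.map_id l)
                intro q hq
                have : q.1 ≠ cs := by
                  have := hcs_lt q.1 (List.mem_map_of_mem hq)
                  omega
                simp [this]
              · simp
            have hstep : pvStepA (true, PySem.Dict.mk (l ++ [(cs, v)]), p, cs) true
                = (true, PySem.Dict.mk (l ++ [(cs, v + 1)]), p + 1, cs) := by
              simp [pvStepA, hget, hins]
            have hpair' : ((l ++ [(cs, v + 1)]).map Prod.fst).Pairwise (· < ·) := by
              simpa using hpair
            have hlt' : ∀ k ∈ (l ++ [(cs, v + 1)]).map Prod.fst, k < p + 1 := by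
              intro k hk
              have : k < p := hlt k (by simpa using hk)
              omega
            rw [List.foldl_cons, hstep, ihT l cs (v + 1) (p + 1) hpair' hlt']
            rw [show pvRunLen (true :: rest) = pvRunLen rest + 1 from rfl,
              List.drop_succ_cons]
            have e1 : v + 1 + (pvRunLen rest : Int)
                = v + ((pvRunLen rest + 1 : Nat) : Int) := by push_cast; ring
            have e2 : p + 1 + (pvRunLen rest : Int)
                = p + ((pvRunLen rest + 1 : Nat) : Int) := by push_cast; ring
            rw [e1, e2]

-- ===== VERDICT (by name: the statement is the Claim_ definition above) =====
theorem simplerldecoder_spec : Claim_equal_simplerldecoder := by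
  intro data _
  show simplerldecoder data = simplerldecoder_alt data
  unfold simplerldecoder simplerldecoder_alt
  have h := (pvFoldA_spec data).1 [] 0 0 (by simp) (by simp)
  simpa [PySem.Dict.empty] using h
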